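-- pv_equiv track=rewrite | github.com/McGill-NLP/statcan-dialogue-dataset | eacl_code/apps/dpr_demo.py | is_a_timestamp
-- ===== SOURCE A (Python) =====
-- def is_a_timestamp(line):
--     if ":" not in line:
--         return False
--
--     time_split = line.split(":")
--     if len(time_split) != 3:
--         return False
--
--     for unit in time_split:
--         if len(unit) != 2 or not unit.isdigit():
--             return False
--
--     return True
-- ===== SOURCE B (Python) =====
-- def is_a_timestamp(line):
--     return (
--         len(line) == 8
--         and line[2] == ":"
--         and line[5] == ":"
--         and line[0:2].isdigit()
--         and line[3:5].isdigit()
--         and line[6:8].isdigit()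
--     )
-- ===== Notes on version B (the rewrite author's own statement) =====
-- stated objective: simpler
-- what changed: B validates the line by fixed character positions (length 8, colons at indices 2 and 5, digit pairs via two-character slices) instead of splitting on ':' and looping over the parts.
import Mathlib
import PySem

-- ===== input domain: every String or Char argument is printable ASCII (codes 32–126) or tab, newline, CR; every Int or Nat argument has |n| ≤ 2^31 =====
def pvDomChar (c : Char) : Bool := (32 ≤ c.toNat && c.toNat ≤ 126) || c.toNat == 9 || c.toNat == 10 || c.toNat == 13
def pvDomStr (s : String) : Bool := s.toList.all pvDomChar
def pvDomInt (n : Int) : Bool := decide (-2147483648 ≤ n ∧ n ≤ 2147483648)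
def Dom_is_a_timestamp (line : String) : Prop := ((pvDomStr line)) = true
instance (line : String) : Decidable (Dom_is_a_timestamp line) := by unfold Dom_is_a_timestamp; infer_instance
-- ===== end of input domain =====

-- B replaces A's split-on-':'-and-loop scan by a direct positional check (length 8, colons at 2 and 5, digit pairs as slices); return values proved equal on all inputs.

-- ===== PORT A =====
-- the 'for unit in time_split: if …: return False' loop of A
def pvALoop : List (List Char) → Bool
  | [] => true
  | u :: rest =>
    if u.length ≠ 2 ∨ PySem.Chars.strIsdigit u = false then false
    else pvALoop rest

def is_a_timestamp (line : String) : Bool :=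
  if PySem.Str.isIn ":" line = false then false
  else
    let time_split := PySem.Chars.splitOn line.toList [':']
    if time_split.length ≠ 3 then false
    else pvALoop time_split

-- ===== PORT B =====
def is_a_timestamp_alt (line : String) : Bool :=
  (PySem.Str.len line == 8)
  && (PySem.Str.pyGet? line 2 == some ':')
  && (PySem.Str.pyGet? line 5 == some ':')
  && PySem.Chars.strIsdigit (PySem.Chars.slice line.toList (some 0) (some 2))
  && PySem.Chars.strIsdigit (PySem.Chars.slice line.toList (some 3) (some 5))
  && PySem.Chars.strIsdigit (PySem.Chars.slice line.toList (some 6) (some 8))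

-- ===== PRECONDITION & SPEC =====
def Spec_is_a_timestamp (line : String) (out : Bool) : Prop := out = is_a_timestamp_alt line
instance (line : String) (out : Bool) : Decidable (Spec_is_a_timestamp line out) := by unfold Spec_is_a_timestamp; infer_instance

-- ===== CLAIM (what is proved, stated in full; the proofs are below) =====
def Claim_equal_is_a_timestamp : Prop := ∀ (line : String), Dom_is_a_timestamp line → Spec_is_a_timestamp line (is_a_timestamp line)

-- ===== LEMMAS AND PROOFS =====

-- reference splitter for a single-character separator ':'
def pvSplit : List Char → List Char → List (List Char)
  | [], cur => [cur.reverse]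
  | x :: rest, cur => if x = ':' then cur.reverse :: pvSplit rest [] else pvSplit rest (x :: cur)

lemma pvSplit_ne_nil (l cur : List Char) : pvSplit l cur ≠ [] := by
  cases l with
  | nil => simp [pvSplit]
  | cons x rest =>
    by_cases hx : x = ':'
    · simp [pvSplit, hx]
    · simp [pvSplit, hx]
      exact pvSplit_ne_nil rest _

lemma go_eq (l : List Char) : ∀ (fuel : Nat) (cur : List Char) (acc : List (List Char)),
    l.length < fuel →
    PySem.Chars.splitOn.go [':'] fuel l cur acc = acc.reverse ++ pvSplit l cur := by
  induction l with
  | nil =>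
    intro fuel cur acc h
    match fuel with
    | fuel + 1 => simp [PySem.Chars.splitOn.go, pvSplit]
  | cons c rest ih =>
    intro fuel cur acc h
    match fuel with
    | fuel + 1 =>
      by_cases hc : c = ':'
      · subst hc
        have hpre : List.isPrefixOf [':'] (':' :: rest) = true := by
          simp [List.isPrefixOf]
        rw [PySem.Chars.splitOn.go]
        simp only [hpre, if_true]
        rw [show List.drop [':'].length (':' :: rest) = rest from rfl]
        rw [ih fuel [] ((cur.reverse :: acc)) (by simp only [List.length_cons] at h; omega)]
        simp [pvSplit]
      · have hpre : List.isPrefixOf [':'] (c :: rest) = false := by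
          simp [List.isPrefixOf]
          exact fun hh => (hc hh.symm).elim
        rw [PySem.Chars.splitOn.go]
        simp only [hpre, Bool.false_eq_true, if_false]
        rw [ih fuel (c :: cur) acc (by simp only [List.length_cons] at h; omega)]
        simp [pvSplit, hc]

lemma splitOn_eq (l : List Char) : PySem.Chars.splitOn l [':'] = pvSplit l [] := by
  rw [PySem.Chars.splitOn, go_eq l (l.length + 1) [] [] (by omega)]
  simp

-- join the pieces back with ':'
def pvJoin : List (List Char) → List Char
  | [] => []
  | [p] => p
  | p :: ps => p ++ ':' :: pvJoin ps

lemma pvJoin_pvSplit (l : List Char) : ∀ cur, pvJoin (pvSplit l cur) = cur.reverse ++ l := by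
  induction l with
  | nil => intro cur; simp [pvSplit, pvJoin]
  | cons c rest ih =>
    intro cur
    by_cases hc : c = ':'
    · subst hc
      obtain ⟨q, t, hqt⟩ : ∃ q t, pvSplit rest [] = q :: t := by
        cases hps : pvSplit rest [] with
        | nil => exact absurd hps (pvSplit_ne_nil rest [])
        | cons q t => exact ⟨q, t, rfl⟩
      have hjoin : pvJoin (cur.reverse :: q :: t) = cur.reverse ++ ':' :: pvJoin (q :: t) := rfl
      have hrest := ih []
      rw [hqt] at hrest
      simp only [List.reverse_nil, List.nil_append] at hrest
      rw [show pvSplit (':' :: rest) cur = cur.reverse :: pvSplit rest [] from by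
        simp [pvSplit]]
      rw [hqt, hjoin, hrest]
    · simp only [pvSplit, if_neg hc]
      rw [ih (c :: cur)]
      simp

lemma isdigit_ne_colon {c : Char} (h : PySem.Chars.isdigit c = true) : c ≠ ':' := by
  intro hc; subst hc; simp [PySem.Chars.isdigit] at h

-- the common shape: exactly dd:dd:dd
def pvShape (l : List Char) : Prop :=
  ∃ a b c d e f, l = [a, b, ':', c, d, ':', e, f] ∧
    PySem.Chars.isdigit a = true ∧ PySem.Chars.isdigit b = true ∧
    PySem.Chars.isdigit c = true ∧ PySem.Chars.isdigit d = true ∧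
    PySem.Chars.isdigit e = true ∧ PySem.Chars.isdigit f = true

lemma a_iff_shape (line : String) : is_a_timestamp line = true ↔ pvShape line.toList := by
  constructor
  · intro h
    unfold is_a_timestamp at h
    simp only [splitOn_eq] at h
    split_ifs at h with h1 h2
    obtain ⟨u, v, w, huvw⟩ := List.length_eq_three.mp (not_ne_iff.mp h2)
    rw [huvw] at h
    have hrec := pvJoin_pvSplit line.toList []
    rw [huvw] at hrec
    have hjoin : pvJoin [u, v, w] = u ++ ':' :: (v ++ ':' :: w) := rfl
    rw [hjoin] at hrec
    simp only [List.reverse_nil, List.nil_append] at hrec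
    simp only [pvALoop] at h
    split_ifs at h with hu hv hw
    push Not at hu hv hw
    obtain ⟨a, b, hab⟩ := List.length_eq_two.mp hu.1
    obtain ⟨c, d, hcd⟩ := List.length_eq_two.mp hv.1
    obtain ⟨e, f, hef⟩ := List.length_eq_two.mp hw.1
    subst hab hcd hef
    simp only [ne_eq, Bool.not_eq_false, PySem.Chars.strIsdigit, List.isEmpty_cons,
      List.all_cons, List.all_nil, Bool.not_false, Bool.true_and, Bool.and_true,
      Bool.and_eq_true] at hu hv hw
    refine ⟨a, b, c, d, e, f, ?_, hu.2.1, hu.2.2, hv.2.1, hv.2.2, hw.2.1, hw.2.2⟩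
    rw [← hrec]; simp
  · rintro ⟨a, b, c, d, e, f, hl, ha, hb, hc, hd, he, hf⟩
    have na := isdigit_ne_colon ha
    have nb := isdigit_ne_colon hb
    have nc := isdigit_ne_colon hc
    have nd := isdigit_ne_colon hd
    have ne' := isdigit_ne_colon he
    have nf := isdigit_ne_colon hf
    unfold is_a_timestamp
    have hin : PySem.Str.isIn ":" line = true := by
      rw [PySem.Str.isIn]
      rw [PySem.Chars.isIn_iff_infix]
      exact ⟨[a, b], [c, d, ':', e, f], by simp [hl]⟩
    simp only [hin, Bool.true_eq_false, if_false, splitOn_eq, hl]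
    simp [pvSplit, na, nb, nc, nd, ne', nf, pvALoop, PySem.Chars.strIsdigit,
      ha, hb, hc, hd, he, hf]

lemma b_iff_shape (line : String) : is_a_timestamp_alt line = true ↔ pvShape line.toList := by
  constructor
  · intro h
    unfold is_a_timestamp_alt at h
    simp only [PySem.Str.len, PySem.Str.pyGet?, PySem.Chars.pyGet?_eq_listPyGet?,
      PySem.Chars.slice_eq_listSlice, Bool.and_eq_true, beq_iff_eq] at h
    show pvShape line.toList
    generalize hL : line.toList = L at h ⊢
    obtain ⟨⟨⟨⟨⟨hlen, h2⟩, h5⟩, s1⟩, s2⟩, s3⟩ := h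
    have hlen8 : L.length = 8 := by exact_mod_cast hlen
    rcases L with _|⟨a,_|⟨b,_|⟨x,_|⟨c,_|⟨d,_|⟨y,_|⟨e,_|⟨f,_|⟨g,L⟩⟩⟩⟩⟩⟩⟩⟩⟩ <;>
      simp only [List.length_cons, List.length_nil] at hlen8 <;> try omega
    simp [PySem.List.pyGet?, PySem.List.pyIdx?] at h2 h5
    simp [PySem.List.slice, PySem.List.clampIdx, PySem.Chars.strIsdigit] at s1 s2 s3
    exact ⟨a, b, c, d, e, f, by rw [h2, h5], s1.1, s1.2, s2.1, s2.2, s3.1, s3.2⟩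
  · rintro ⟨a, b, c, d, e, f, hl, ha, hb, hc, hd, he, hf⟩
    unfold is_a_timestamp_alt
    rw [PySem.Str.len, PySem.Str.pyGet?, PySem.Str.pyGet?, hl]
    simp [PySem.Chars.pyGet?_eq_listPyGet?, PySem.List.pyGet?, PySem.List.pyIdx?,
      PySem.Chars.slice_eq_listSlice, PySem.List.slice, PySem.List.clampIdx,
      PySem.Chars.strIsdigit, ha, hb, hc, hd, he, hf]

theorem is_a_timestamp_spec : Claim_equal_is_a_timestamp := by
  intro line _
  unfold Spec_is_a_timestamp
  have hA := a_iff_shape line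
  have hB := b_iff_shape line
  cases h1 : is_a_timestamp line <;> cases h2 : is_a_timestamp_alt line <;>
    rw [h1] at hA <;> rw [h2] at hB <;> simp_all
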